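-- pv_equiv track=rewrite | github.com/Roflkemper/chat-bot-v2 | tools/backtest_signals.py | _nearest_pivot_in_window
-- ===== SOURCE A (Python) =====
-- def _nearest_pivot_in_window(
--     pivot_indices: list[int], target_idx: int, tolerance: int,
-- ) -> int | None:
--     """Return pivot_idx within ±tolerance of target_idx, nearest if multiple."""
--     best = None
--     best_dist = tolerance + 1
--     for pi in pivot_indices:
--         d = abs(pi - target_idx)
--         if d <= tolerance and d < best_dist:
--             best = pi
--             best_dist = d
--     return best
-- ===== SOURCE B (Python) =====
-- def _nearest_pivot_in_window(pivot_indices, target_idx, tolerance):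
--     candidates = [pi for pi in pivot_indices if abs(pi - target_idx) <= tolerance]
--     if not candidates:
--         return None
--     return min(candidates, key=lambda pi: abs(pi - target_idx))
-- ===== Notes on version B (the rewrite author's own statement) =====
-- stated objective: idiomatic
-- what changed: Replaces the manual running-best loop with its tolerance+1 sentinel distance by a declarative filter of in-window pivots followed by min with a distance key (min's first-minimum rule matches A's strict-improvement tie-break).
import Mathlib
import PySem

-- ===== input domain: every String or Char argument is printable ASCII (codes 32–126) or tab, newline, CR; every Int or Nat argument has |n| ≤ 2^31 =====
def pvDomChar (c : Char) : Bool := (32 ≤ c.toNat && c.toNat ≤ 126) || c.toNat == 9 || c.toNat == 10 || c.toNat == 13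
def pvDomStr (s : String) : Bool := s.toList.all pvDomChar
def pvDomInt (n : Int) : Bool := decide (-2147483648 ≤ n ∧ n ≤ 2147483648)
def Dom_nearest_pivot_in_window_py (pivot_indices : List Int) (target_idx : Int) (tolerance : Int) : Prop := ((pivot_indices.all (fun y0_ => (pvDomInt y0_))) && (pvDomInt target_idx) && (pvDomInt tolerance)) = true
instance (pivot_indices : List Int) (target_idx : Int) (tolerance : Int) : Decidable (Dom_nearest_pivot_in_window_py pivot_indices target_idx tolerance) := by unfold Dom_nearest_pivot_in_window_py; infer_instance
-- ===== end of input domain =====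

-- B replaces A's manual running-best loop (sentinel distance tolerance+1) by
-- filter-then-min-with-key; idiomatic, same O(n) cost.

-- ===== PORT A =====
-- A's loop body: d = abs(pi - target_idx); if d <= tolerance and d < best_dist: update
def pvStepA (t tol : Int) (acc : Option Int × Int) (pi : Int) : Option Int × Int :=
  let d := |pi - t|
  if d ≤ tol ∧ d < acc.2 then (some pi, d) else acc

def nearest_pivot_in_window_py (pivot_indices : List Int) (target_idx : Int) (tolerance : Int) : Option Int :=
  (pivot_indices.foldl (pvStepA target_idx tolerance) (none, tolerance + 1)).1

-- ===== PORT B =====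
-- CPython's min(iterable, key=…): keep the first element whose key no later key strictly beats
def pvMinGo (t : Int) (b : Int) : List Int → Int
  | [] => b
  | y :: ys => pvMinGo t (if |y - t| < |b - t| then y else b) ys

def nearest_pivot_in_window_py_alt (pivot_indices : List Int) (target_idx : Int) (tolerance : Int) : Option Int :=
  match pivot_indices.filter (fun pi => decide (|pi - target_idx| ≤ tolerance)) with
  | [] => none
  | x :: rest => some (pvMinGo target_idx x rest)

-- ===== PRECONDITION & SPEC =====
def Spec_nearest_pivot_in_window_py (pivot_indices : List Int) (target_idx : Int) (tolerance : Int) (out : Option Int) : Prop := out = nearest_pivot_in_window_py_alt pivot_indices target_idx tolerance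
instance (pivot_indices : List Int) (target_idx : Int) (tolerance : Int) (out : Option Int) : Decidable (Spec_nearest_pivot_in_window_py pivot_indices target_idx tolerance out) := by unfold Spec_nearest_pivot_in_window_py; infer_instance

-- ===== CLAIM (what is proved, stated in full; the proofs are below) =====
def Claim_equal_nearest_pivot_in_window_py : Prop := ∀ (pivot_indices : List Int) (target_idx : Int) (tolerance : Int), Dom_nearest_pivot_in_window_py pivot_indices target_idx tolerance → Spec_nearest_pivot_in_window_py pivot_indices target_idx tolerance (nearest_pivot_in_window_py pivot_indices target_idx tolerance)

-- ===== LEMMAS AND PROOFS =====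

-- Once A's loop holds a best b (with best_dist = |b - t|), it agrees with B's min scan
-- over the remaining in-window elements.
theorem pv_foldl_some (t tol : Int) (xs : List Int) : ∀ (b : Int),
    xs.foldl (pvStepA t tol) (some b, |b - t|)
      = (some (pvMinGo t b (xs.filter (fun pi => decide (|pi - t| ≤ tol)))),
         |pvMinGo t b (xs.filter (fun pi => decide (|pi - t| ≤ tol))) - t|) := by
  induction xs with
  | nil => intro b; simp [pvMinGo]
  | cons x xs ih =>
    intro b
    by_cases hle : |x - t| ≤ tol
    · by_cases hlt : |x - t| < |b - t|
      · simpa [pvStepA, hle, hlt, pvMinGo] using ih x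
      · simpa [pvStepA, hle, hlt, pvMinGo] using ih b
    · simpa [pvStepA, hle, pvMinGo] using ih b

-- Before the first in-window element, A's state stays (none, tolerance + 1).
theorem pv_foldl_none (t tol : Int) (xs : List Int) :
    (xs.foldl (pvStepA t tol) (none, tol + 1)).1
      = (match xs.filter (fun pi => decide (|pi - t| ≤ tol)) with
         | [] => none
         | x :: rest => some (pvMinGo t x rest)) := by
  induction xs with
  | nil => simp
  | cons x xs ih =>
    by_cases hle : |x - t| ≤ tol
    · have hlt : |x - t| < tol + 1 := by omega
      simp only [List.foldl_cons, pvStepA, hle, hlt, and_self, if_pos]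
      rw [pv_foldl_some]
      simp [hle]
    · simp [pvStepA, hle, ih]

-- ===== VERDICT (by name: the statement is the Claim_ definition above) =====
theorem nearest_pivot_in_window_py_spec : Claim_equal_nearest_pivot_in_window_py := by
  intro pivot_indices target_idx tolerance _
  unfold Spec_nearest_pivot_in_window_py nearest_pivot_in_window_py nearest_pivot_in_window_py_alt
  exact pv_foldl_none target_idx tolerance pivot_indices
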